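-- pv_equiv track=rewrite | github.com/fkguo/autoresearch-lab | skills/paper-reviser/scripts/bin/paper_reviser_edit.py | _first_unescaped_comment_pos
-- ===== SOURCE A (Python) =====
-- def _first_unescaped_comment_pos(line: str) -> int | None:
--     """
--     Return index of the first TeX comment-starting % in the line, or None.
--
--     Treat % as starting a comment unless it is escaped as \% (odd backslashes).
--     Best-effort: TeX tokenization is more complex, but this catches common cases.
--     """
--     for i, ch in enumerate(line):
--         if ch != "%":
--             continue
--         j = i - 1
--         bs = 0
--         while j >= 0 and line[j] == "\\":
--             bs += 1
--             j -= 1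
--         if bs % 2 == 0:
--             return i
--     return None
-- ===== SOURCE B (Python) =====
-- def _first_unescaped_comment_pos(line: str) -> int | None:
--     # Single forward pass: bs = number of consecutive backslashes just before
--     # the current character; a % starts a comment iff bs is even.
--     bs = 0
--     for i, ch in enumerate(line):
--         if ch == "\\":
--             bs += 1
--         elif ch == "%":
--             if bs % 2 == 0:
--                 return i
--             bs = 0
--         else:
--             bs = 0
--     return None
-- ===== Notes on version B (the rewrite author's own statement) =====
-- stated objective: simpler
-- what changed: Replaced the per-% backward inner scan with a single forward pass carrying a running count of consecutive preceding backslashes.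
import Mathlib
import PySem

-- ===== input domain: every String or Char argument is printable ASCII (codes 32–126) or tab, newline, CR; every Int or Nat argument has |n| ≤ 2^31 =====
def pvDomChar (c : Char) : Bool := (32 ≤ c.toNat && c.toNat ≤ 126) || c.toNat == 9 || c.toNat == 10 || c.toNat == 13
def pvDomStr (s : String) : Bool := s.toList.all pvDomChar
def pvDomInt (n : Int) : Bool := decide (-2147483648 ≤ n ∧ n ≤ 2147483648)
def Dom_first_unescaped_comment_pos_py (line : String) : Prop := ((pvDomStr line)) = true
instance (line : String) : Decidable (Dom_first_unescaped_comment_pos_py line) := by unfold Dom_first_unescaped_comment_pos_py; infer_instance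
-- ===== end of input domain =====

-- B replaces A's per-% backward inner scan with one forward pass carrying a
-- running count of consecutive preceding backslashes (simpler, single pass).

-- ===== PORT A =====
-- the inner `while j >= 0 and line[j] == "\\"` loop, called with argument i (= j+1):
-- count of consecutive backslashes in l ending just before index i
def pvBsBack (l : List Char) : Nat → Nat
  | 0 => 0
  | j + 1 => if l.getD j ' ' = '\\' then pvBsBack l j + 1 else 0

-- the `for i, ch in enumerate(line)` loop
def pvALoop (l : List Char) : Nat → List Char → Option Int
  | _, [] => none
  | i, c :: rest =>
    if c ≠ '%' then pvALoop l (i + 1) rest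
    else if pvBsBack l i % 2 = 0 then some (i : Int)
    else pvALoop l (i + 1) rest

def first_unescaped_comment_pos_py (line : String) : Option Int :=
  pvALoop line.toList 0 line.toList

-- ===== PORT B =====
-- single forward pass: bs = consecutive backslashes immediately before index i
def pvBLoop : Nat → Nat → List Char → Option Int
  | _, _, [] => none
  | bs, i, c :: rest =>
    if c = '\\' then pvBLoop (bs + 1) (i + 1) rest
    else if c = '%' then
      if bs % 2 = 0 then some (i : Int) else pvBLoop 0 (i + 1) rest
    else pvBLoop 0 (i + 1) rest

def first_unescaped_comment_pos_py_alt (line : String) : Option Int :=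
  pvBLoop 0 0 line.toList

-- ===== PRECONDITION & SPEC =====
def Spec_first_unescaped_comment_pos_py (line : String) (out : Option Int) : Prop := out = first_unescaped_comment_pos_py_alt line
instance (line : String) (out : Option Int) : Decidable (Spec_first_unescaped_comment_pos_py line out) := by unfold Spec_first_unescaped_comment_pos_py; infer_instance

-- ===== CLAIM (what is proved, stated in full; the proofs are below) =====
def Claim_equal_first_unescaped_comment_pos_py : Prop := ∀ (line : String), Dom_first_unescaped_comment_pos_py line → Spec_first_unescaped_comment_pos_py line (first_unescaped_comment_pos_py line)

-- ===== LEMMAS AND PROOFS =====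

-- invariant: on the suffix l.drop i, B's carried bs equals A's backward count pvBsBack l i
theorem pvLoop_eq (l : List Char) : ∀ (s : List Char) (i : Nat), s = l.drop i →
    pvALoop l i s = pvBLoop (pvBsBack l i) i s := by
  intro s
  induction s with
  | nil => intro i _; simp [pvALoop, pvBLoop]
  | cons c rest ih =>
    intro i hs
    have hi : l.getD i ' ' = c := by
      have h0 : (l.drop i).getD 0 ' ' = c := by rw [← hs]; rfl
      simpa [List.getD_eq_getElem?_getD, List.getElem?_drop] using h0
    have hrest : rest = l.drop (i + 1) := by
      have : (l.drop i).drop 1 = rest := by rw [← hs]; rfl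
      simpa [List.drop_drop, Nat.add_comm] using this.symm
    have hnext : pvBsBack l (i + 1) = if l.getD i ' ' = '\\' then pvBsBack l i + 1 else 0 := rfl
    by_cases hc : c = '%'
    · subst hc
      by_cases hbs : pvBsBack l i % 2 = 0
      · simp [pvALoop, pvBLoop, hbs]
      · have : pvBsBack l (i + 1) = 0 := by rw [hnext, hi]; simp
        simp [pvALoop, pvBLoop, hbs, ih (i + 1) hrest, this]
    · by_cases hb : c = '\\'
      · subst hb
        have : pvBsBack l (i + 1) = pvBsBack l i + 1 := by rw [hnext, hi]; simp
        simp [pvALoop, pvBLoop, hc, ih (i + 1) hrest, this]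
      · have : pvBsBack l (i + 1) = 0 := by rw [hnext, hi]; simp [hb]
        simp [pvALoop, pvBLoop, hc, hb, ih (i + 1) hrest, this]

-- ===== VERDICT (by name: the statement is the Claim_ definition above) =====
theorem first_unescaped_comment_pos_py_spec : Claim_equal_first_unescaped_comment_pos_py := by
  intro line _
  unfold Spec_first_unescaped_comment_pos_py first_unescaped_comment_pos_py first_unescaped_comment_pos_py_alt
  have h := pvLoop_eq line.toList line.toList 0 (by simp)
  simpa [pvBsBack] using h
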